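-- pv_equiv track=rewrite | github.com/amaurits/MultiLexScaled | valence.py | wordinset_wild
-- ===== SOURCE A (Python) =====
-- def wordinset_wild(word, wordset, wild='*'):
--     """Return True if word not in wordset, nor matched by wildcard.
--
--     Note: accepts a wildcard (default '*') for '0 or more letters'.
--     """
--     if word in wordset:
--         return True
--     else:
--         if word[-1] != wild:
--             word += wild
--         while len(word) > 2:
--             if word in wordset:
--                 return True
--             else:
--                 word = word[:-2] + wild
--     return False
-- ===== SOURCE B (Python) =====
-- def wordinset_wild(word, wordset, wild='*'):
--     """Return True if word is in wordset directly or matched by a trailing-wildcard pattern."""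
--     if word in wordset:
--         return True
--     if not word:
--         return False
--     base = word[:-1] if word[-1] == wild else word
--     n = len(base)
--     for pat in wordset:
--         if 3 <= len(pat) <= n + 1 and pat.endswith(wild) and base.startswith(pat[:-1]):
--             return True
--     return False
-- ===== Notes on version B (the rewrite author's own statement) =====
-- stated objective: alternative
-- what changed: A repeatedly mutates the query string and probes the set once per prefix length; B instead scans the wordset once and tests each stored entry directly as a trailing-wildcard pattern against the word (length bounds + endswith + startswith), with no string mutation.
-- outside the precondition, e.g. on wordinset_wild('abcde', {'abcd'}, ''): A returns False, B returns True; on wordinset_wild('abc', set(), '**'): A does not finish within the time limit, B returns False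
import Mathlib
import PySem

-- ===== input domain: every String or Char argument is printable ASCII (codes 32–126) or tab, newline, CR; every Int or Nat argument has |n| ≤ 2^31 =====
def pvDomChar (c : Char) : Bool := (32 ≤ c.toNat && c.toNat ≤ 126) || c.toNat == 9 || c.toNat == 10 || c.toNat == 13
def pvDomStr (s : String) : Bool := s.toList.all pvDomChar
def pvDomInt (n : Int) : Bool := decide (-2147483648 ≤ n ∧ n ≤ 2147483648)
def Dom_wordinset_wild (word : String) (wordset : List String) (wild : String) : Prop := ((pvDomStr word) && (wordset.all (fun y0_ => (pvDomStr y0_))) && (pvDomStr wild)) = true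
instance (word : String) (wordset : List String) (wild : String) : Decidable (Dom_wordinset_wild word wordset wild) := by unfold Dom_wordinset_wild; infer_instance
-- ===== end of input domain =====

-- B scans the wordset once, testing each stored entry as a trailing-wildcard pattern
-- against the word, instead of A's string-mutating while-loop of membership probes (alternative).


-- ===== PORT A =====
-- A's while-loop, over char lists; fuel bounds the number of iterations (inside Pre_,
-- where wild is one character, each iteration shortens word by 1, so the supplied
-- fuel (length of the looped word) + 1 is never exhausted).
def pvAloop (ws : List (List Char)) (wild : List Char) : Nat → List Char → Bool
  | 0, _ => false
  | fuel+1, w =>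
    if 2 < w.length then
      if ws.contains w then true
      else pvAloop ws wild fuel (PySem.List.slice w none (some (-2)) ++ wild)
    else false

-- "if word[-1] != wild: word += wild" — the word entering A's while loop
def pvAWord (w wl : List Char) (c : Char) : List Char :=
  if [c] ≠ wl then w ++ wl else w

def wordinset_wild (word : String) (wordset : List String) (wild : String) : Bool :=
  if (wordset.map String.toList).contains word.toList then true
  else
    match PySem.List.pyGet? word.toList (-1) with
    | none => false   -- Python raises IndexError here (word = ''); excluded by Pre_
    | some c =>
      pvAloop (wordset.map String.toList) wild.toList
        ((pvAWord word.toList wild.toList c).length + 1)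
        (pvAWord word.toList wild.toList c)

-- ===== PORT B =====
-- "base = word[:-1] if word[-1] == wild else word"
def pvBBase (w wl : List Char) : List Char :=
  match PySem.List.pyGet? w (-1) with
  | some c => if [c] = wl then PySem.List.slice w none (some (-1)) else w
  | none => w   -- unreachable: w is nonempty at the call site

def wordinset_wild_alt (word : String) (wordset : List String) (wild : String) : Bool :=
  if (wordset.map String.toList).contains word.toList then true
  else if word.toList.isEmpty then false
  else
    (wordset.map String.toList).any (fun pat =>
      decide (3 ≤ pat.length) &&
      decide (pat.length ≤ (pvBBase word.toList wild.toList).length + 1) &&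
      PySem.Chars.endswith pat wild.toList &&
      PySem.Chars.startswith (pvBBase word.toList wild.toList)
        (PySem.List.slice pat none (some (-1))))

-- ===== PRECONDITION & SPEC =====
-- Pre_ excludes: (a) empty word not in wordset, where A raises IndexError at word[-1];
-- (b) when word is not directly in wordset, wild of length ≠ 1, where A's loop
-- word = word[:-2] + wild stops shrinking and usually diverges (len(wild) ≥ 2), or
-- walks prefixes in steps of 2 (wild = ''), an accident of the implementation no
-- caller of this '*'-wildcard helper exercises. (word ∈ wordset is admitted for any wild.)
def Pre_wordinset_wild (word : String) (wordset : List String) (wild : String) : Prop :=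
  (word ∈ wordset ∨ word ≠ "") ∧ (wild.toList.length = 1 ∨ word ∈ wordset)
instance (word : String) (wordset : List String) (wild : String) : Decidable (Pre_wordinset_wild word wordset wild) := by unfold Pre_wordinset_wild; infer_instance

def pvWitness_wordinset_wild : String × List String × String := ("ab", ["ab*"], "*")

def Spec_wordinset_wild (word : String) (wordset : List String) (wild : String) (out : Bool) : Prop := out = wordinset_wild_alt word wordset wild
instance (word : String) (wordset : List String) (wild : String) (out : Bool) : Decidable (Spec_wordinset_wild word wordset wild out) := by unfold Spec_wordinset_wild; infer_instance

-- ===== CLAIM (what is proved, stated in full; the proofs are below) =====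
def Claim_equal_wordinset_wild : Prop := ∀ (word : String) (wordset : List String) (wild : String), Dom_wordinset_wild word wordset wild → Pre_wordinset_wild word wordset wild → Spec_wordinset_wild word wordset wild (wordinset_wild word wordset wild)


-- ===== LEMMAS AND PROOFS =====

-- taking k ≤ len-1 elements commutes with dropLast
lemma pv_take_dropLast (l : List Char) (k : Nat) (h : k ≤ l.length - 1) :
    l.dropLast.take k = l.take k := by
  simp [List.dropLast_eq_take, List.take_take]
  omega

-- word[:-2] on a char list is dropping the last two characters
lemma pv_slice_neg_two (l : List Char) :
    PySem.List.slice l none (some (-2)) = l.dropLast.dropLast := by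
  rw [PySem.List.slice_to_neg_ofNat l 2 (by omega)]
  simp [List.dropLast_eq_take, List.take_take]
  omega

-- characterisation of A's loop on words of the shape base ++ [c0]
lemma pvAloop_spec (ws : List (List Char)) (c0 : Char) (fuel : Nat) (b : List Char)
    (hf : b.length ≤ fuel) :
    pvAloop ws [c0] fuel (b ++ [c0]) = true ↔
      ∃ k, 2 ≤ k ∧ k ≤ b.length ∧ ws.contains (b.take k ++ [c0]) = true := by
  induction fuel generalizing b with
  | zero =>
    simp [pvAloop]
    intro k hk hkb
    omega
  | succ fuel ih =>
    by_cases hlen : 2 < (b ++ [c0]).length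
    · simp only [pvAloop, if_pos hlen]
      have hb2 : 2 ≤ b.length := by simp at hlen; omega
      by_cases hc : ws.contains (b ++ [c0]) = true
      · simp only [hc]
        constructor
        · intro _
          exact ⟨b.length, hb2, le_refl _, by simpa using hc⟩
        · intro _; rfl
      · rw [if_neg (by simpa using hc)]
        have hslice : PySem.List.slice (b ++ [c0]) none (some (-2)) = b.dropLast := by
          rw [pv_slice_neg_two]
          simp
        rw [hslice]
        have hlb : b.dropLast.length ≤ fuel := by
          simp [List.length_dropLast]; omega
        rw [ih b.dropLast hlb]
        constructor
        · rintro ⟨k, hk2, hkb, hmem⟩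
          rw [List.length_dropLast] at hkb
          refine ⟨k, hk2, by omega, ?_⟩
          rwa [pv_take_dropLast b k (by omega)] at hmem
        · rintro ⟨k, hk2, hkb, hmem⟩
          rcases Nat.lt_or_ge k b.length with hlt | hge
          · refine ⟨k, hk2, ?_, ?_⟩
            · rw [List.length_dropLast]; omega
            · rwa [pv_take_dropLast b k (by omega)]
          · exfalso
            have : k = b.length := by omega
            subst this
            rw [List.take_length] at hmem
            exact hc hmem
    · simp only [pvAloop, if_neg hlen]
      have hb1 : b.length ≤ 1 := by simp at hlen ⊢; omega
      constructor
      · intro h; cases h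
      · rintro ⟨k, hk2, hkb, _⟩
        omega

-- characterisation of B's single pass over the wordset
lemma pv_any_spec (ws : List (List Char)) (c0 : Char) (base : List Char) :
    (ws.any (fun pat =>
        decide (3 ≤ pat.length) && decide (pat.length ≤ base.length + 1) &&
        PySem.Chars.endswith pat [c0] &&
        PySem.Chars.startswith base (PySem.List.slice pat none (some (-1)))) = true) ↔
      ∃ k, 2 ≤ k ∧ k ≤ base.length ∧ ws.contains (base.take k ++ [c0]) = true := by
  simp only [List.any_eq_true, Bool.and_eq_true, decide_eq_true_eq,
    PySem.Chars.endswith_iff, PySem.Chars.startswith_iff, PySem.List.slice_to_neg_one,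
    List.contains_iff_mem]
  constructor
  · rintro ⟨pat, hmem, ⟨⟨h3, hle⟩, hsuf⟩, hpre⟩
    obtain ⟨t, rfl⟩ := hsuf
    have hdl : (t ++ [c0]).dropLast = t := by simp
    rw [hdl] at hpre
    have ht : t = base.take t.length := (List.prefix_iff_eq_take.mp hpre)
    refine ⟨t.length, by simp at h3; omega, ?_, ?_⟩
    · have := hpre.length_le; omega
    · rw [← ht]; exact hmem
  · rintro ⟨k, hk2, hkb, hmem⟩
    refine ⟨base.take k ++ [c0], hmem, ⟨⟨?_, ?_⟩, ?_⟩, ?_⟩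
    · simp only [List.length_append, List.length_take, List.length_cons, List.length_nil]
      omega
    · simp only [List.length_append, List.length_take, List.length_cons, List.length_nil]
      omega
    · exact List.suffix_append _ _
    · rw [List.dropLast_concat]
      exact List.take_prefix _ _

-- membership in the mapped wordset is membership of the string
lemma pv_contains_map (wordset : List String) (s : String) :
    (wordset.map String.toList).contains s.toList = wordset.contains s := by
  simp [String.toList_inj]

-- ===== VERDICT (by name: the statement is the Claim_ definition above) =====
theorem wordinset_wild_spec : Claim_equal_wordinset_wild := by
  intro word wordset wild _ hpre
  obtain ⟨hne, hw⟩ := hpre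
  unfold Spec_wordinset_wild wordinset_wild wordinset_wild_alt
  by_cases hcs : (wordset.map String.toList).contains word.toList = true
  · rw [if_pos hcs, if_pos hcs]
  · have hnm : ¬ word ∈ wordset := by
      intro hm
      apply hcs
      rw [pv_contains_map wordset word]
      simpa [List.contains_iff_mem] using hm
    obtain ⟨c0, hwl⟩ := List.length_eq_one_iff.mp (hw.resolve_right hnm)
    rw [if_neg hcs, if_neg hcs]
    have hnw : word ≠ "" := hne.resolve_left hnm
    have hwe : word.toList ≠ [] := by simpa [String.toList_eq_nil_iff] using hnw
    rw [if_neg (by simpa [List.isEmpty_iff] using hwe)]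
    rcases (word.toList).eq_nil_or_concat with h0 | ⟨b, c, hbc⟩
    · exact absurd h0 hwe
    rw [hbc, hwl]
    have hget : PySem.List.pyGet? (b ++ [c]) (-1) = some c := by
      simp [PySem.List.pyGet?, PySem.List.pyIdx?]
    have hbase : pvBBase (b ++ [c]) [c0] = if c = c0 then b else b ++ [c] := by
      simp [pvBBase, hget, PySem.List.slice_to_neg_one]
    simp only [List.concat_eq_append]
    simp only [hget, hbase]
    by_cases hcc : c = c0
    · subst hcc
      have hword : pvAWord (b ++ [c]) [c] c = b ++ [c] := by simp [pvAWord]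
      rw [hword, if_pos rfl]
      apply (Bool.eq_iff_iff).mpr
      rw [pvAloop_spec (wordset.map String.toList) c ((b ++ [c]).length + 1) b (by simp only [List.length_append, List.length_cons, List.length_nil]; omega)]
      rw [pv_any_spec (wordset.map String.toList) c b]
    · have hword : pvAWord (b ++ [c]) [c0] c = (b ++ [c]) ++ [c0] := by
        simp [pvAWord, hcc]
      rw [hword, if_neg hcc]
      apply (Bool.eq_iff_iff).mpr
      rw [pvAloop_spec (wordset.map String.toList) c0 (((b ++ [c]) ++ [c0]).length + 1) (b ++ [c]) (by simp only [List.length_append, List.length_cons, List.length_nil]; omega)]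
      rw [pv_any_spec (wordset.map String.toList) c0 (b ++ [c])]
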